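-- pv_equiv track=rewrite | github.com/silvio-blip/ai_dietAssisstant-main | src/diet_generator.py | is_food_compatible
-- ===== SOURCE A (Python) =====
-- def is_food_compatible(food_name, dietary_restrictions):
--     restrictions = [r.lower() for r in dietary_restrictions]
--
--     # Define food categories
--     vegan_foods = {'apple', 'banana', 'quinoa', 'brown rice', 'sweet potato', 'spinach',
--                   'lentils', 'almonds', 'black beans', 'avocado', 'tofu', 'oatmeal'}
--     vegetarian_foods = vegan_foods | {'greek yogurt'}
--     gluten_free_foods = {'apple', 'banana', 'chicken breast', 'salmon', 'sweet potato',
--                         'spinach', 'lentils', 'almonds', 'greek yogurt', 'quinoa',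
--                         'black beans', 'avocado', 'tofu'}
--     lactose_free_foods = {'apple', 'banana', 'chicken breast', 'salmon', 'brown rice',
--                          'sweet potato', 'spinach', 'lentils', 'almonds', 'quinoa',
--                          'black beans', 'avocado', 'tofu', 'oatmeal'}
--
--     food_name = food_name.lower()
--
--     if 'vegan' in restrictions and food_name not in vegan_foods:
--         return False
--     if 'vegetarian' in restrictions and food_name not in vegetarian_foods:
--         return False
--     if 'gluten-free' in restrictions and food_name not in gluten_free_foods:
--         return False
--     if 'lactose-free' in restrictions and food_name not in lactose_free_foods:
--         return False
--
--     return True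
-- ===== SOURCE B (Python) =====
-- def is_food_compatible(food_name, dietary_restrictions):
--     vegan_foods = {'apple', 'banana', 'quinoa', 'brown rice', 'sweet potato', 'spinach',
--                    'lentils', 'almonds', 'black beans', 'avocado', 'tofu', 'oatmeal'}
--     allowed_by_restriction = {
--         'vegan': vegan_foods,
--         'vegetarian': vegan_foods | {'greek yogurt'},
--         'gluten-free': {'apple', 'banana', 'chicken breast', 'salmon', 'sweet potato',
--                         'spinach', 'lentils', 'almonds', 'greek yogurt', 'quinoa',
--                         'black beans', 'avocado', 'tofu'},
--         'lactose-free': {'apple', 'banana', 'chicken breast', 'salmon', 'brown rice',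
--                          'sweet potato', 'spinach', 'lentils', 'almonds', 'quinoa',
--                          'black beans', 'avocado', 'tofu', 'oatmeal'},
--     }
--     food = food_name.lower()
--     for restriction in dietary_restrictions:
--         allowed = allowed_by_restriction.get(restriction.lower())
--         if allowed is not None and food not in allowed:
--             return False
--     return True
-- ===== Notes on version B (the rewrite author's own statement) =====
-- stated objective: idiomatic
-- what changed: Replaces the four fixed category branches (each scanning the whole lowered restriction list) by a dict from restriction keyword to its allowed-food set and a single pass over the input restrictions that returns False on the first violation.
import Mathlib
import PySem

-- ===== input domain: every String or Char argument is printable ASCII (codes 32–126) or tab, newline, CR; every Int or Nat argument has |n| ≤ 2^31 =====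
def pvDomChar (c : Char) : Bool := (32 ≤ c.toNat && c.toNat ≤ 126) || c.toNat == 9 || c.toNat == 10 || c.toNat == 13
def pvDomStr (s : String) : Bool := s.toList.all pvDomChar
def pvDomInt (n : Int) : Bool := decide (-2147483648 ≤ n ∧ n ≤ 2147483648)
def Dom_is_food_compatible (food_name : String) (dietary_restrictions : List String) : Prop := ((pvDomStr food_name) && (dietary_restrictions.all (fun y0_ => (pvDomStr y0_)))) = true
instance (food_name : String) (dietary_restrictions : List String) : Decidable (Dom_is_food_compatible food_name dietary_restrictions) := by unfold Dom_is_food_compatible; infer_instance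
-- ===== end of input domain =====

-- B replaces A's four fixed category branches by a keyword→allowed-set dict and one
-- early-exit pass over the input restrictions (idiomatic, data-driven; same cost).

-- ===== PORT A =====
def pvVeganFoods : PySem.Set String := PySem.Set.ofList
  ["apple", "banana", "quinoa", "brown rice", "sweet potato", "spinach",
   "lentils", "almonds", "black beans", "avocado", "tofu", "oatmeal"]
def pvVegetarianFoods : PySem.Set String := PySem.Set.union pvVeganFoods (PySem.Set.ofList ["greek yogurt"])
def pvGlutenFreeFoods : PySem.Set String := PySem.Set.ofList
  ["apple", "banana", "chicken breast", "salmon", "sweet potato",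
   "spinach", "lentils", "almonds", "greek yogurt", "quinoa",
   "black beans", "avocado", "tofu"]
def pvLactoseFreeFoods : PySem.Set String := PySem.Set.ofList
  ["apple", "banana", "chicken breast", "salmon", "brown rice",
   "sweet potato", "spinach", "lentils", "almonds", "quinoa",
   "black beans", "avocado", "tofu", "oatmeal"]

def is_food_compatible (food_name : String) (dietary_restrictions : List String) : Bool :=
  let restrictions := dietary_restrictions.map PySem.Str.lower
  let food := PySem.Str.lower food_name
  if restrictions.contains "vegan" && !(PySem.Set.contains pvVeganFoods food) then false
  else if restrictions.contains "vegetarian" && !(PySem.Set.contains pvVegetarianFoods food) then false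
  else if restrictions.contains "gluten-free" && !(PySem.Set.contains pvGlutenFreeFoods food) then false
  else if restrictions.contains "lactose-free" && !(PySem.Set.contains pvLactoseFreeFoods food) then false
  else true

-- ===== PORT B =====
def pvVeganAlt : PySem.Set String := PySem.Set.ofList
  ["apple", "banana", "quinoa", "brown rice", "sweet potato", "spinach",
   "lentils", "almonds", "black beans", "avocado", "tofu", "oatmeal"]
def pvAllowedByRestriction : PySem.Dict String (PySem.Set String) := PySem.Dict.ofList
  [("vegan", pvVeganAlt),
   ("vegetarian", PySem.Set.union pvVeganAlt (PySem.Set.ofList ["greek yogurt"])),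
   ("gluten-free", PySem.Set.ofList
     ["apple", "banana", "chicken breast", "salmon", "sweet potato",
      "spinach", "lentils", "almonds", "greek yogurt", "quinoa",
      "black beans", "avocado", "tofu"]),
   ("lactose-free", PySem.Set.ofList
     ["apple", "banana", "chicken breast", "salmon", "brown rice",
      "sweet potato", "spinach", "lentils", "almonds", "quinoa",
      "black beans", "avocado", "tofu", "oatmeal"])]

def pvAltLoop (food : String) : List String → Bool
  | [] => true
  | r :: rest =>
    match PySem.Dict.get? pvAllowedByRestriction (PySem.Str.lower r) with
    | some allowed => if PySem.Set.contains allowed food then pvAltLoop food rest else false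
    | none => pvAltLoop food rest

def is_food_compatible_alt (food_name : String) (dietary_restrictions : List String) : Bool :=
  pvAltLoop (PySem.Str.lower food_name) dietary_restrictions

-- ===== PRECONDITION & SPEC =====
def Spec_is_food_compatible (food_name : String) (dietary_restrictions : List String) (out : Bool) : Prop := out = is_food_compatible_alt food_name dietary_restrictions
instance (food_name : String) (dietary_restrictions : List String) (out : Bool) : Decidable (Spec_is_food_compatible food_name dietary_restrictions out) := by unfold Spec_is_food_compatible; infer_instance

-- ===== CLAIM (what is proved, stated in full; the proofs are below) =====
def Claim_equal_is_food_compatible : Prop := ∀ (food_name : String) (dietary_restrictions : List String), Dom_is_food_compatible food_name dietary_restrictions → Spec_is_food_compatible food_name dietary_restrictions (is_food_compatible food_name dietary_restrictions)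

-- ===== LEMMAS AND PROOFS =====

-- "does food pass the restriction named by the (already lowered) key k"
def pvOk (food k : String) : Bool :=
  match PySem.Dict.get? pvAllowedByRestriction k with
  | some allowed => PySem.Set.contains allowed food
  | none => true

lemma pvAltLoop_cons (food r : String) (rest : List String) :
    pvAltLoop food (r :: rest) = (pvOk food (PySem.Str.lower r) && pvAltLoop food rest) := by
  rw [pvAltLoop]
  cases h : PySem.Dict.get? pvAllowedByRestriction (PySem.Str.lower r) with
  | none => simp [pvOk, h]
  | some allowed =>
    simp only [pvOk, h]
    cases hc : PySem.Set.contains allowed food <;> simp_all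

lemma pvAltLoop_eq_all (food : String) (l : List String) :
    pvAltLoop food l = l.all (fun r => pvOk food (PySem.Str.lower r)) := by
  induction l with
  | nil => rfl
  | cons r rest ih => rw [pvAltLoop_cons, List.all_cons, ih]

lemma pvOk_vegan (food : String) : pvOk food "vegan" = PySem.Set.contains pvVeganFoods food := rfl
lemma pvOk_vegetarian (food : String) : pvOk food "vegetarian" = PySem.Set.contains pvVegetarianFoods food := rfl
lemma pvOk_gluten (food : String) : pvOk food "gluten-free" = PySem.Set.contains pvGlutenFreeFoods food := rfl
lemma pvOk_lactose (food : String) : pvOk food "lactose-free" = PySem.Set.contains pvLactoseFreeFoods food := rfl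

lemma pvKeys : pvAllowedByRestriction.keys = ["vegan", "vegetarian", "gluten-free", "lactose-free"] := rfl

lemma pvOk_other (food k : String) (h1 : k ≠ "vegan") (h2 : k ≠ "vegetarian")
    (h3 : k ≠ "gluten-free") (h4 : k ≠ "lactose-free") : pvOk food k = true := by
  unfold pvOk
  have hnone : PySem.Dict.get? pvAllowedByRestriction k = none := by
    rw [PySem.Dict.get?_eq_none_iff_not_mem_keys, pvKeys]
    simp [h1, h2, h3, h4]
  rw [hnone]

lemma pvAll_ok_iff (food : String) (l : List String) :
    l.all (pvOk food) = true ↔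
      ((l.contains "vegan" = true → PySem.Set.contains pvVeganFoods food = true) ∧
       (l.contains "vegetarian" = true → PySem.Set.contains pvVegetarianFoods food = true) ∧
       (l.contains "gluten-free" = true → PySem.Set.contains pvGlutenFreeFoods food = true) ∧
       (l.contains "lactose-free" = true → PySem.Set.contains pvLactoseFreeFoods food = true)) := by
  rw [List.all_eq_true]
  constructor
  · intro h
    refine ⟨fun hc => ?_, fun hc => ?_, fun hc => ?_, fun hc => ?_⟩
    · have := h "vegan" (by simpa using hc); simpa [pvOk_vegan] using this
    · have := h "vegetarian" (by simpa using hc); simpa [pvOk_vegetarian] using this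
    · have := h "gluten-free" (by simpa using hc); simpa [pvOk_gluten] using this
    · have := h "lactose-free" (by simpa using hc); simpa [pvOk_lactose] using this
  · rintro ⟨h1, h2, h3, h4⟩ r hr
    by_cases e1 : r = "vegan"
    · subst e1; rw [pvOk_vegan]; exact h1 (by simpa using hr)
    by_cases e2 : r = "vegetarian"
    · subst e2; rw [pvOk_vegetarian]; exact h2 (by simpa using hr)
    by_cases e3 : r = "gluten-free"
    · subst e3; rw [pvOk_gluten]; exact h3 (by simpa using hr)
    by_cases e4 : r = "lactose-free"
    · subst e4; rw [pvOk_lactose]; exact h4 (by simpa using hr)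
    exact pvOk_other food r e1 e2 e3 e4

lemma pvA_iff (food : String) (l : List String) :
    (if l.contains "vegan" && !(PySem.Set.contains pvVeganFoods food) then false
     else if l.contains "vegetarian" && !(PySem.Set.contains pvVegetarianFoods food) then false
     else if l.contains "gluten-free" && !(PySem.Set.contains pvGlutenFreeFoods food) then false
     else if l.contains "lactose-free" && !(PySem.Set.contains pvLactoseFreeFoods food) then false
     else true) = true ↔
      ((l.contains "vegan" = true → PySem.Set.contains pvVeganFoods food = true) ∧
       (l.contains "vegetarian" = true → PySem.Set.contains pvVegetarianFoods food = true) ∧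
       (l.contains "gluten-free" = true → PySem.Set.contains pvGlutenFreeFoods food = true) ∧
       (l.contains "lactose-free" = true → PySem.Set.contains pvLactoseFreeFoods food = true)) := by
  split_ifs with h1 h2 h3 h4 <;> simp_all

-- ===== VERDICT (by name: the statement is the Claim_ definition above) =====
theorem is_food_compatible_spec : Claim_equal_is_food_compatible := by
  intro food_name dietary_restrictions _
  unfold Spec_is_food_compatible is_food_compatible is_food_compatible_alt
  rw [pvAltLoop_eq_all]
  have hmap : dietary_restrictions.all (fun r => pvOk (PySem.Str.lower food_name) (PySem.Str.lower r))
      = (dietary_restrictions.map PySem.Str.lower).all (pvOk (PySem.Str.lower food_name)) := by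
    rw [List.all_map]; rfl
  rw [hmap]
  rw [Bool.eq_iff_iff]
  exact (pvA_iff _ _).trans (pvAll_ok_iff _ _).symm
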